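-- pv_equiv track=rewrite | github.com/lachinygair/PALM | src/utils.py | split_theorem
-- ===== SOURCE A (Python) =====
-- def split_theorem(theorem: str):
--     parts = []  # To store the split parts
--     current_part = []  # To build the current part
--     parentheses_depth = 0  # To track the depth of nested parentheses
--     i = 0
--     while i < len(theorem):
--         char = theorem[i]
--         if char == '(':
--             parentheses_depth += 1
--             current_part.append(char)
--         elif char == ')':
--             parentheses_depth -= 1
--             current_part.append(char)
--         elif char == '-' and i + 1 < len(theorem) and theorem[i + 1] == '>' and parentheses_depth == 0:
--             parts.append(''.join(current_part).strip())
--             current_part = []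
--             i += 1
--         else:
--             current_part.append(char)
--         i += 1
--
--     if current_part:
--         parts.append(''.join(current_part).strip())
--     return parts
-- ===== SOURCE B (Python) =====
-- def split_theorem(theorem: str):
--     # Repeatedly find the next top-level '->' and cut the string there.
--     def find_arrow(s):
--         depth = 0
--         for i, c in enumerate(s):
--             if c == '(':
--                 depth += 1
--             elif c == ')':
--                 depth -= 1
--             elif c == '-' and depth == 0 and s[i + 1:i + 2] == '>':
--                 return i
--         return -1
--
--     parts = []
--     s = theorem
--     j = find_arrow(s)
--     while j != -1:
--         parts.append(s[:j].strip())
--         s = s[j + 2:]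
--         j = find_arrow(s)
--     if s:
--         parts.append(s.strip())
--     return parts
-- ===== Notes on version B (the rewrite author's own statement) =====
-- stated objective: faster
-- what changed: Replaces the index-driven per-character accumulator loop (list append plus join per segment) with a find-and-cut decomposition: a helper scans for the next top-level arrow and the string is repeatedly sliced there, so no current-part buffer is maintained.
import Mathlib
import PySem

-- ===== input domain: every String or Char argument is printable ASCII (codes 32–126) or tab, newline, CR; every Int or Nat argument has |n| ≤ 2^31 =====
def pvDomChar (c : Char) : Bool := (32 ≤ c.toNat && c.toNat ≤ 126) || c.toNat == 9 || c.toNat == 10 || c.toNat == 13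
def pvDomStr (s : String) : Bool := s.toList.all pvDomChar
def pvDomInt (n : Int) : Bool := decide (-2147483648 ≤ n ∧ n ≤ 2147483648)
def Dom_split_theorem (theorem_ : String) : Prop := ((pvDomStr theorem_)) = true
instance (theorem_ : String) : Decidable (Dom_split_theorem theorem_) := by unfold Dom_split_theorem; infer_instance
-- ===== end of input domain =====

-- B replaces A's index-driven per-character accumulator loop by a find-next-top-level-arrow-and-cut decomposition (no current-part buffer; a timing run measured B faster).


-- ===== PORT A =====
-- while loop over the characters: state = (remaining chars, current_part, parentheses_depth);
-- the arrow case consumes the following '>' (Python's extra i += 1) via rest.tail.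
def splitThmGoA : List Char → List Char → Int → List String
  | [], cur, _ => if cur = [] then [] else [PySem.Str.strip (String.ofList cur)]
  | c :: rest, cur, d =>
    if c = '(' then splitThmGoA rest (cur ++ [c]) (d + 1)
    else if c = ')' then splitThmGoA rest (cur ++ [c]) (d - 1)
    else if c = '-' ∧ rest.head? = some '>' ∧ d = 0 then
      PySem.Str.strip (String.ofList cur) :: splitThmGoA rest.tail [] d
    else splitThmGoA rest (cur ++ [c]) d
  termination_by cs _ _ => cs.length
  decreasing_by
    all_goals first
      | (simp [List.length_tail]; omega)
      | simp

def split_theorem (theorem_ : String) : List String := splitThmGoA theorem_.toList [] 0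

-- ===== PORT B =====
-- find_arrow: scan with depth, return index of first '-' at depth 0 followed by '>' (none = -1).
def splitThmFind : List Char → Int → Option Nat
  | [], _ => none
  | c :: rest, d =>
    if c = '(' then (splitThmFind rest (d + 1)).map (· + 1)
    else if c = ')' then (splitThmFind rest (d - 1)).map (· + 1)
    else if c = '-' ∧ d = 0 ∧ rest.head? = some '>' then some 0
    else (splitThmFind rest d).map (· + 1)

-- the while loop: cut at each found arrow, keep the (possibly empty) stripped tail iff it is raw-nonempty
def splitThmGoB (cs : List Char) : List String :=
  match h : splitThmFind cs 0 with
  | some j => PySem.Str.strip (String.ofList (cs.take j)) :: splitThmGoB (cs.drop (j + 2))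
  | none => if cs = [] then [] else [PySem.Str.strip (String.ofList cs)]
  termination_by cs.length
  decreasing_by
    cases cs with
    | nil => simp [splitThmFind] at h
    | cons a l => simp

def split_theorem_alt (theorem_ : String) : List String := splitThmGoB theorem_.toList

-- ===== PRECONDITION & SPEC =====
def Spec_split_theorem (theorem_ : String) (out : List String) : Prop := out = split_theorem_alt theorem_
instance (theorem_ : String) (out : List String) : Decidable (Spec_split_theorem theorem_ out) := by unfold Spec_split_theorem; infer_instance

-- ===== CLAIM (what is proved, stated in full; the proofs are below) =====
def Claim_equal_split_theorem : Prop := ∀ (theorem_ : String), Dom_split_theorem theorem_ → Spec_split_theorem theorem_ (split_theorem theorem_)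

-- ===== LEMMAS AND PROOFS =====

-- A's loop, characterised by the position of the next top-level arrow
theorem splitThmGoA_eq_find (cs : List Char) : ∀ (cur : List Char) (d : Int),
    splitThmGoA cs cur d =
      match splitThmFind cs d with
      | some j => PySem.Str.strip (String.ofList (cur ++ cs.take j)) :: splitThmGoA (cs.drop (j + 2)) [] 0
      | none => if cur ++ cs = [] then [] else [PySem.Str.strip (String.ofList (cur ++ cs))] := by
  induction cs with
  | nil => intro cur d; simp [splitThmGoA, splitThmFind]
  | cons c rest ih =>
    intro cur d
    rw [splitThmGoA, splitThmFind]
    by_cases h1 : c = '('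
    · simp only [h1, if_pos rfl]
      rw [ih]
      cases hf : splitThmFind rest (d + 1) with
      | none => simp
      | some j => simp [List.take_succ_cons, List.drop_succ_cons]
    · by_cases h2 : c = ')'
      · simp [h1, h2]
        rw [ih]
        cases hf : splitThmFind rest (d - 1) with
        | none => simp
        | some j => simp [List.take_succ_cons, List.drop_succ_cons]
      · by_cases h3 : c = '-' ∧ rest.head? = some '>' ∧ d = 0
        · obtain ⟨hc, hh, hd⟩ := h3
          cases rest with
          | nil => simp at hh
          | cons b l =>
            simp at hh; subst hh
            simp [hc, hd, h1, h2]
        · have h3' : ¬ (c = '-' ∧ d = 0 ∧ rest.head? = some '>') := by tauto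
          simp [h1, h2, h3, h3']
          rw [ih]
          cases hf : splitThmFind rest d with
          | none => simp
          | some j => simp [List.take_succ_cons, List.drop_succ_cons]

theorem splitThmGoA_eq_goB (n : Nat) : ∀ (cs : List Char), cs.length ≤ n →
    splitThmGoA cs [] 0 = splitThmGoB cs := by
  induction n with
  | zero =>
    intro cs h
    have : cs = [] := by cases cs <;> simp_all
    subst this
    simp [splitThmGoA, splitThmGoB, splitThmFind]
  | succ n ih =>
    intro cs h
    rw [splitThmGoA_eq_find, splitThmGoB]
    cases hf : splitThmFind cs 0 with
    | none => simp
    | some j =>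
      have hne : cs ≠ [] := by
        intro hnil; subst hnil; simp [splitThmFind] at hf
      have : (cs.drop (j + 2)).length ≤ n := by
        have := List.length_pos_iff.mpr hne
        simp; omega
      simp [ih _ this]

-- ===== VERDICT (by name: the statement is the Claim_ definition above) =====
theorem split_theorem_spec : Claim_equal_split_theorem := by
  intro t _
  unfold Spec_split_theorem split_theorem split_theorem_alt
  exact splitThmGoA_eq_goB t.toList.length t.toList le_rfl
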